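-- pv_equiv track=rewrite | github.com/wggRobotic/Robodog | idefix/utilities.py | shift_columns
-- ===== SOURCE A (Python) =====
-- def shift_columns(nested_lists, shifts):
--     if not nested_lists or not shifts:
--         return []
--
--     num_rows = len(nested_lists)
--     num_cols = len(nested_lists[0])
--
--     # Ensure all inner lists have the same length
--     if not all(len(sublist) == num_cols for sublist in nested_lists):
--         raise ValueError("All lists in nested_lists must have the same length")
--
--     # Ensure the shifts list has the same length as the number of columns
--     if len(shifts) != num_cols:
--         raise ValueError(
--             "The shifts list must have as many elements as there are columns in nested_lists"
--         )
--
--     # Initialize a new list with None values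
--     shifted = [[None] * num_cols for _ in range(num_rows)]
--
--     for col in range(num_cols):  # Iterate through all columns
--         shift = shifts[col]  # Offset for this column
--
--         for row in range(num_rows):  # Iterate through all rows
--             new_row = (row + shift) % num_rows  # New position after shifting
--             shifted[new_row][col] = nested_lists[row][col]
--
--     return shifted
-- ===== SOURCE B (Python) =====
-- def shift_columns(nested_lists, shifts):
--     if not nested_lists or not shifts:
--         return []
--
--     num_rows = len(nested_lists)
--     num_cols = len(nested_lists[0])
--
--     if not all(len(sublist) == num_cols for sublist in nested_lists):
--         raise ValueError("All lists in nested_lists must have the same length")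
--
--     if len(shifts) != num_cols:
--         raise ValueError(
--             "The shifts list must have as many elements as there are columns in nested_lists"
--         )
--
--     # Rotate each whole column at once by slicing, then transpose back to rows.
--     columns = []
--     for col in range(num_cols):
--         s = shifts[col] % num_rows
--         colvals = [row[col] for row in nested_lists]
--         columns.append(colvals[num_rows - s:] + colvals[:num_rows - s])
--     return [list(row) for row in zip(*columns)]
-- ===== Notes on version B (the rewrite author's own statement) =====
-- stated objective: alternative
-- what changed: Replaces A's per-cell modular scatter into a preallocated matrix with per-column whole-list slice rotation followed by a transpose back to rows.
import Mathlib
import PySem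

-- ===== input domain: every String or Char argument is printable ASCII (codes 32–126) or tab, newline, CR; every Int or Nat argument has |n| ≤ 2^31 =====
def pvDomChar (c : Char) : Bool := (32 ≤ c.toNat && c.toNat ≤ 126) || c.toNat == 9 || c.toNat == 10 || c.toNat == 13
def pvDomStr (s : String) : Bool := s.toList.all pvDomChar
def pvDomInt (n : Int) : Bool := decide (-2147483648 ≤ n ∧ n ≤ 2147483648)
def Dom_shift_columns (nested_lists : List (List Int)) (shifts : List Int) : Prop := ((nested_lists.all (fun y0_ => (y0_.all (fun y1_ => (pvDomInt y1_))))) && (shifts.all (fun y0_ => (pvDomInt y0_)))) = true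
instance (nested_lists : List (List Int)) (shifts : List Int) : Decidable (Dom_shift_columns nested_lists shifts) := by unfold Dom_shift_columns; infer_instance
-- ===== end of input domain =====

-- B replaces A's per-cell modular scatter with whole-column slice rotation plus a transpose back to rows (alternative decomposition, same cost).


-- ===== PORT A =====
-- Python list assignment shifted[i][j] = v (indices in range in every use inside Pre_)
def pvSetCell (a : List (List Int)) (i j : Nat) (v : Int) : List (List Int) :=
  a.set i ((a.getD i []).set j v)

def shift_columns (nested_lists : List (List Int)) (shifts : List Int) : List (List Int) :=
  if nested_lists = [] ∨ shifts = [] then []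
  else
    let num_rows := nested_lists.length
    let num_cols := (nested_lists.headD []).length  -- nested_lists[0]: in range by the guard above
    if ¬ (nested_lists.all (fun sublist => sublist.length == num_cols)) then []  -- ValueError: outside Pre_
    else if shifts.length ≠ num_cols then []  -- ValueError: outside Pre_
    else
      -- [[None]*num_cols ...]: the None placeholder is modeled as 0; inside Pre_ every cell is overwritten
      let shifted0 := (List.range num_rows).map (fun _ => List.replicate num_cols (0 : Int))
      (List.range num_cols).foldl (fun shifted col =>
        let shift := shifts.getD col 0  -- shifts[col]: col < len(shifts) by the guard
        (List.range num_rows).foldl (fun shifted (row : Nat) =>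
          let new_row := PySem.Int.mod ((row : Int) + shift) (num_rows : Int)
          -- new_row ≥ 0 since num_rows > 0, so .toNat is exact
          pvSetCell shifted new_row.toNat col ((nested_lists.getD row []).getD col 0)) shifted)
        shifted0

-- ===== PORT B =====
def shift_columns_alt (nested_lists : List (List Int)) (shifts : List Int) : List (List Int) :=
  if nested_lists = [] ∨ shifts = [] then []
  else
    let num_rows := nested_lists.length
    let num_cols := (nested_lists.headD []).length
    if ¬ (nested_lists.all (fun sublist => sublist.length == num_cols)) then []  -- ValueError: outside Pre_
    else if shifts.length ≠ num_cols then []  -- ValueError: outside Pre_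
    else
      let columns := (List.range num_cols).map (fun col =>
        let s := (PySem.Int.mod (shifts.getD col 0) (num_rows : Int)).toNat  -- nonneg since num_rows > 0
        let colvals := nested_lists.map (fun row => row.getD col 0)  -- row[col]: in range by the guard
        colvals.drop (num_rows - s) ++ colvals.take (num_rows - s))
      -- zip(*columns), row by row
      (List.range num_rows).map (fun i => columns.map (fun c => c.getD i 0))

-- ===== PRECONDITION & SPEC =====
-- Pre_ excludes exactly the inputs on which A raises ValueError (ragged rows, or a shifts list whose
-- length differs from the column count); B raises the same errors there.
def Pre_shift_columns (nested_lists : List (List Int)) (shifts : List Int) : Prop :=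
  nested_lists = [] ∨ shifts = [] ∨
    ((∀ row ∈ nested_lists, row.length = (nested_lists.headD []).length) ∧
      shifts.length = (nested_lists.headD []).length)
instance (nested_lists : List (List Int)) (shifts : List Int) : Decidable (Pre_shift_columns nested_lists shifts) := by unfold Pre_shift_columns; infer_instance
def pvWitness_shift_columns : List (List Int) × List Int := ([[1, 2], [3, 4]], [1, 0])

def Spec_shift_columns (nested_lists : List (List Int)) (shifts : List Int) (out : List (List Int)) : Prop := out = shift_columns_alt nested_lists shifts
instance (nested_lists : List (List Int)) (shifts : List Int) (out : List (List Int)) : Decidable (Spec_shift_columns nested_lists shifts out) := by unfold Spec_shift_columns; infer_instance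

-- ===== CLAIM (what is proved, stated in full; the proofs are below) =====
def Claim_equal_shift_columns : Prop := ∀ (nested_lists : List (List Int)) (shifts : List Int), Dom_shift_columns nested_lists shifts → Pre_shift_columns nested_lists shifts → Spec_shift_columns nested_lists shifts (shift_columns nested_lists shifts)

-- ===== LEMMAS AND PROOFS =====

-- cell read shifted[i][j] (used only in the proofs)
def pvGet2 (a : List (List Int)) (i j : Nat) : Int := (a.getD i []).getD j 0

theorem pvGetD_set {α : Type} (l : List α) (i k : Nat) (v d : α) :
    (l.set i v).getD k d = if i = k ∧ i < l.length then v else l.getD k d := by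
  rw [List.getD_eq_getElem?_getD, List.getD_eq_getElem?_getD, List.getElem?_set]
  split_ifs with h1 h2 <;> simp_all
  omega

theorem pvSetCell_length (a : List (List Int)) (i j : Nat) (v : Int) :
    (pvSetCell a i j v).length = a.length := by simp [pvSetCell]

theorem pvSetCell_rowlen (a : List (List Int)) (i j : Nat) (v : Int) (k : Nat) :
    ((pvSetCell a i j v).getD k []).length = (a.getD k []).length := by
  unfold pvSetCell
  rw [pvGetD_set]
  split_ifs with h
  · simp [h.1]
  · rfl

theorem pvGet2_setCell (a : List (List Int)) (i0 j0 : Nat) (v : Int)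
    (hi0 : i0 < a.length) (hj0 : j0 < (a.getD i0 []).length) (i j : Nat) :
    pvGet2 (pvSetCell a i0 j0 v) i j =
      if i = i0 ∧ j = j0 then v else pvGet2 a i j := by
  unfold pvGet2 pvSetCell
  rw [pvGetD_set]
  split_ifs with h h2 h3
  · rw [h2.2, pvGetD_set, if_pos ⟨rfl, hj0⟩]
  · rw [← h.1, pvGetD_set]
    split_ifs with h5
    · exact absurd ⟨h.1.symm, h5.1.symm⟩ h2
    · rfl
  · exact absurd h3.1 (fun he => h ⟨he.symm, he ▸ hi0⟩)
  · rfl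

theorem pvFold_shape {γ : Type} (F : List (List Int) → γ → List (List Int))
    (hlen : ∀ a x, (F a x).length = a.length)
    (hrow : ∀ a x k, ((F a x).getD k []).length = (a.getD k []).length)
    (L : List γ) : ∀ (a : List (List Int)),
    (L.foldl F a).length = a.length ∧
      ∀ k, ((L.foldl F a).getD k []).length = (a.getD k []).length := by
  induction L with
  | nil => intro a; exact ⟨rfl, fun _ => rfl⟩
  | cons x L ih =>
    intro a
    refine ⟨?_, fun k => ?_⟩
    · rw [List.foldl_cons, (ih (F a x)).1, hlen]
    · rw [List.foldl_cons, (ih (F a x)).2 k, hrow]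

theorem pvInner_get (f : Nat → Nat) (g : Nat → Int) (col : Nat)
    (L : List Nat) : ∀ (a : List (List Int)),
    (∀ r ∈ L, f r < a.length) →
    (∀ r ∈ L, col < (a.getD (f r) []).length) →
    (L.map f).Nodup →
    ∀ i j,
      pvGet2 (L.foldl (fun acc r => pvSetCell acc (f r) col (g r)) a) i j =
        (match L.find? (fun r => f r == i) with
         | some r => if j = col then g r else pvGet2 a i j
         | none => pvGet2 a i j) := by
  induction L with
  | nil => intro a _ _ _ i j; rfl
  | cons r L ih =>
    intro a hf hcol hnd i j
    have hfr : f r < a.length := hf r (List.mem_cons_self ..)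
    have hcolr : col < (a.getD (f r) []).length := hcol r (List.mem_cons_self ..)
    have hlen' : (pvSetCell a (f r) col (g r)).length = a.length := pvSetCell_length ..
    have hrow' : ∀ k, ((pvSetCell a (f r) col (g r)).getD k []).length = (a.getD k []).length :=
      fun k => pvSetCell_rowlen ..
    have hcons : (f r :: L.map f).Nodup := by simpa using hnd
    have hnd' : (L.map f).Nodup := (List.nodup_cons.mp hcons).2
    have hne : ∀ r' ∈ L, f r' ≠ f r := by
      intro r' hr' he
      exact (List.nodup_cons.mp hcons).1 (he ▸ List.mem_map_of_mem hr')
    have ha1 : ∀ r' ∈ L, f r' < (pvSetCell a (f r) col (g r)).length := by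
      intro r' hr'; rw [hlen']; exact hf r' (List.mem_cons_of_mem _ hr')
    have ha2 : ∀ r' ∈ L, col < ((pvSetCell a (f r) col (g r)).getD (f r') []).length := by
      intro r' hr'; rw [hrow' (f r')]; exact hcol r' (List.mem_cons_of_mem _ hr')
    rw [List.foldl_cons, ih (pvSetCell a (f r) col (g r)) ha1 ha2 hnd' i j]
    by_cases hi : f r = i
    · have hnone : L.find? (fun r' => f r' == i) = none := by
        rw [List.find?_eq_none]
        intro r' hr'
        simp only [beq_iff_eq]
        rw [← hi]
        exact hne r' hr'
      rw [hnone, List.find?_cons_of_pos (p := fun r' => f r' == i) (by simpa using hi)]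
      simp only []
      rw [pvGet2_setCell a (f r) col (g r) hfr hcolr i j]
      simp [hi]
    · rw [List.find?_cons_of_neg (p := fun r' => f r' == i) (by simpa using hi)]
      have hg : pvGet2 (pvSetCell a (f r) col (g r)) i j = pvGet2 a i j := by
        rw [pvGet2_setCell a (f r) col (g r) hfr hcolr i j,
            if_neg (fun hc => hi hc.1.symm)]
      cases hfd : L.find? (fun r' => f r' == i) <;> rw [hg]

-- modular arithmetic helpers (n > 0 throughout)
theorem pvMod_toNat_lt (n : Nat) (hn : 0 < n) (x : Int) :
    (PySem.Int.mod x (n : Int)).toNat < n := by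
  have h1 := PySem.Int.mod_lt x (b := (n : Int)) (by exact_mod_cast hn)
  have h2 := PySem.Int.mod_nonneg x (b := (n : Int)) (by exact_mod_cast hn)
  omega

theorem pvMod_cast_toNat (n : Nat) (hn : 0 < n) (x : Int) :
    (((PySem.Int.mod x (n : Int)).toNat : Nat) : Int) = PySem.Int.mod x (n : Int) := by
  have h2 := PySem.Int.mod_nonneg x (b := (n : Int)) (by exact_mod_cast hn)
  omega

theorem pvMod_add_cancel (n : Nat) (hn : 0 < n) (x s : Int) :
    PySem.Int.mod (((PySem.Int.mod x (n : Int)).toNat : Int) + s) (n : Int) =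
      PySem.Int.mod (x + s) (n : Int) := by
  have hpos : (0 : Int) < (n : Int) := by exact_mod_cast hn
  rw [pvMod_cast_toNat n hn x, PySem.Int.mod_eq_emod_of_pos hpos,
      PySem.Int.mod_eq_emod_of_pos hpos, PySem.Int.mod_eq_emod_of_pos hpos,
      Int.emod_add_emod]

theorem pvMod_self_eq (n : Nat) (hn : 0 < n) (i : Nat) (hi : i < n) :
    PySem.Int.mod (i : Int) (n : Int) = (i : Int) := by
  have hpos : (0 : Int) < (n : Int) := by exact_mod_cast hn
  rw [PySem.Int.mod_eq_emod_of_pos hpos]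
  exact Int.emod_eq_of_lt (by positivity) (by exact_mod_cast hi)

theorem pvMod_right_inv (n : Nat) (hn : 0 < n) (s : Int) (i : Nat) (hi : i < n) :
    (PySem.Int.mod (((PySem.Int.mod ((i : Int) - s) (n : Int)).toNat : Int) + s) (n : Int)).toNat = i := by
  rw [pvMod_add_cancel n hn _ s, sub_add_cancel, pvMod_self_eq n hn i hi]
  omega

theorem pvMod_left_inv (n : Nat) (hn : 0 < n) (s : Int) (r : Nat) (hr : r < n) :
    (PySem.Int.mod (((PySem.Int.mod ((r : Int) + s) (n : Int)).toNat : Int) - s) (n : Int)).toNat = r := by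
  rw [show ((PySem.Int.mod ((r : Int) + s) (n : Int)).toNat : Int) - s =
      ((PySem.Int.mod ((r : Int) + s) (n : Int)).toNat : Int) + (-s) by ring,
      pvMod_add_cancel n hn _ (-s), show (r : Int) + s + -s = (r : Int) by ring,
      pvMod_self_eq n hn r hr]
  omega

theorem pvNodup_range_mod (n : Nat) (hn : 0 < n) (t : Int) :
    ((List.range n).map (fun (r : Nat) => (PySem.Int.mod ((r : Int) + t) (n : Int)).toNat)).Nodup := by
  refine List.Nodup.map_on ?_ (List.nodup_range)
  intro x hx y hy hxy
  have hx' := pvMod_left_inv n hn t x (List.mem_range.mp hx)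
  have hy' := pvMod_left_inv n hn t y (List.mem_range.mp hy)
  rw [← hx', ← hy', hxy]

theorem pvFind_range (n : Nat) (hn : 0 < n) (t : Int) (i : Nat) (hi : i < n) :
    (List.range n).find? (fun (r : Nat) => (PySem.Int.mod ((r : Int) + t) (n : Int)).toNat == i) =
      some (PySem.Int.mod ((i : Int) - t) (n : Int)).toNat := by
  have hr0n : (PySem.Int.mod ((i : Int) - t) (n : Int)).toNat < n := pvMod_toNat_lt n hn _
  have hfr0 : (PySem.Int.mod (((PySem.Int.mod ((i : Int) - t) (n : Int)).toNat : Int) + t) (n : Int)).toNat = i :=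
    pvMod_right_inv n hn t i hi
  cases hfd : (List.range n).find? (fun (r : Nat) => (PySem.Int.mod ((r : Int) + t) (n : Int)).toNat == i) with
  | none =>
    exact absurd (by simpa using hfr0)
      (List.find?_eq_none.mp hfd _ (List.mem_range.mpr hr0n))
  | some r' =>
    have h1 : (PySem.Int.mod ((r' : Int) + t) (n : Int)).toNat = i := by
      simpa using List.find?_some hfd
    have h2 : r' ∈ List.range n := List.mem_of_find?_eq_some hfd
    have hx' := pvMod_left_inv n hn t r' (List.mem_range.mp h2)
    rw [show r' = (PySem.Int.mod ((i : Int) - t) (n : Int)).toNat by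
      rw [← hx', h1]]

theorem pvOuter_get (nl : List (List Int)) (sh : List Int) (hn : 0 < nl.length)
    (L : List Nat) : ∀ (a : List (List Int)),
    a.length = nl.length →
    (∀ k, k < nl.length → (a.getD k []).length = (nl.headD []).length) →
    L.Nodup → (∀ c ∈ L, c < (nl.headD []).length) →
    ∀ i j, i < nl.length →
      pvGet2 (L.foldl (fun shifted col =>
          (List.range nl.length).foldl (fun shifted (row : Nat) =>
            pvSetCell shifted (PySem.Int.mod ((row : Int) + sh.getD col 0) (nl.length : Int)).toNat col
              ((nl.getD row []).getD col 0)) shifted) a) i j =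
        if j ∈ L then
          pvGet2 nl (PySem.Int.mod ((i : Int) - sh.getD j 0) (nl.length : Int)).toNat j
        else pvGet2 a i j := by
  induction L with
  | nil => intro a _ _ _ _ i j _; simp
  | cons c L ih =>
    intro a ha1 ha2 hnd hmem i j hi
    have hstep := pvFold_shape
      (fun sh' (row : Nat) => pvSetCell sh'
        (PySem.Int.mod ((row : Int) + sh.getD c 0) (nl.length : Int)).toNat c
        ((nl.getD row []).getD c 0))
      (fun a x => pvSetCell_length ..) (fun a x k => pvSetCell_rowlen ..)
      (List.range nl.length) a
    have hnd' := (List.nodup_cons.mp hnd).2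
    have hmem' : ∀ c' ∈ L, c' < (nl.headD []).length :=
      fun c' hc' => hmem c' (List.mem_cons_of_mem _ hc')
    rw [List.foldl_cons, ih _ (by rw [hstep.1]; exact ha1)
      (fun k hk => by rw [hstep.2 k]; exact ha2 k hk) hnd' hmem' i j hi]
    have hInner := pvInner_get
      (fun (row : Nat) => (PySem.Int.mod ((row : Int) + sh.getD c 0) (nl.length : Int)).toNat)
      (fun (row : Nat) => (nl.getD row []).getD c 0) c (List.range nl.length) a
      (fun r _ => by rw [ha1]; exact pvMod_toNat_lt nl.length hn _)
      (fun r _ => by rw [ha2 _ (pvMod_toNat_lt nl.length hn _)]; exact hmem c (List.mem_cons_self ..))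
      (pvNodup_range_mod nl.length hn _) i j
    rw [pvFind_range nl.length hn (sh.getD c 0) i hi] at hInner
    by_cases hjL : j ∈ L
    · rw [if_pos hjL, if_pos (List.mem_cons_of_mem _ hjL)]
    · rw [if_neg hjL, hInner]
      dsimp only
      by_cases hjc : j = c
      · subst hjc
        rw [if_pos rfl, if_pos (List.mem_cons_self ..)]
        rfl
      · rw [if_neg hjc, if_neg (by simp [hjc, hjL])]

theorem pvRi_eq (n : Nat) (hn : 0 < n) (t : Int) (i : Nat) (hi : i < n) :
    (PySem.Int.mod ((i : Int) - t) (n : Int)).toNat =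
      if i < (PySem.Int.mod t (n : Int)).toNat then
        n - (PySem.Int.mod t (n : Int)).toNat + i
      else i - (PySem.Int.mod t (n : Int)).toNat := by
  have hpos : (0 : Int) < (n : Int) := by exact_mod_cast hn
  have h0s : 0 ≤ PySem.Int.mod t (n : Int) := PySem.Int.mod_nonneg t (b := (n : Int)) hpos
  have hsn : PySem.Int.mod t (n : Int) < (n : Int) := PySem.Int.mod_lt t (b := (n : Int)) hpos
  have key : PySem.Int.mod ((i : Int) - t) (n : Int) =
      PySem.Int.mod ((i : Int) - PySem.Int.mod t (n : Int)) (n : Int) := by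
    rw [PySem.Int.mod_eq_emod_of_pos hpos, PySem.Int.mod_eq_emod_of_pos hpos,
        PySem.Int.mod_eq_emod_of_pos hpos]
    conv_lhs => rw [Int.sub_emod]
    conv_rhs => rw [Int.sub_emod, Int.emod_emod_of_dvd t (dvd_refl (n : Int))]
  rw [key, PySem.Int.mod_eq_emod_of_pos hpos]
  by_cases his : i < (PySem.Int.mod t (n : Int)).toNat
  · rw [if_pos his]
    have h1 : ((i : Int) - PySem.Int.mod t (n : Int) + (n : Int)) % (n : Int) =
        ((i : Int) - PySem.Int.mod t (n : Int)) % (n : Int) := by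
      simpa using Int.add_mul_emod_self_left
        (a := (i : Int) - PySem.Int.mod t (n : Int)) (b := (n : Int)) (c := 1)
    rw [← h1, Int.emod_eq_of_lt (by omega) (by omega)]
    omega
  · rw [if_neg his, Int.emod_eq_of_lt (by omega) (by omega)]
    omega

theorem pvExt2 (A B : List (List Int)) (hAB : A.length = B.length)
    (hrow : ∀ i, i < A.length → (A.getD i []).length = (B.getD i []).length)
    (hcell : ∀ i j, i < A.length → j < (A.getD i []).length →
      (A.getD i []).getD j 0 = (B.getD i []).getD j 0) : A = B := by
  apply List.ext_getElem hAB
  intro i h1 h2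
  apply List.ext_getElem
  · have h := hrow i h1
    rwa [List.getD_eq_getElem _ _ h1, List.getD_eq_getElem _ _ h2] at h
  · intro j hj1 hj2
    have h := hcell i j h1 (by rwa [List.getD_eq_getElem _ _ h1])
    rw [List.getD_eq_getElem _ _ h1, List.getD_eq_getElem _ _ h2] at h
    rwa [List.getD_eq_getElem _ _ hj1, List.getD_eq_getElem _ _ hj2] at h

theorem pvB_cell (nl : List (List Int)) (sh : List Int) (hn : 0 < nl.length)
    (i j : Nat) (hi : i < nl.length) (hj : j < (nl.headD []).length) :
    (((List.range (nl.headD []).length).map (fun col =>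
        (nl.map (fun row => row.getD col 0)).drop
            (nl.length - (PySem.Int.mod (sh.getD col 0) (nl.length : Int)).toNat) ++
          (nl.map (fun row => row.getD col 0)).take
            (nl.length - (PySem.Int.mod (sh.getD col 0) (nl.length : Int)).toNat))).map
      (fun c => c.getD i 0)).getD j 0 =
    pvGet2 nl (PySem.Int.mod ((i : Int) - sh.getD j 0) (nl.length : Int)).toNat j := by
  have hsn : (PySem.Int.mod (sh.getD j 0) (nl.length : Int)).toNat < nl.length :=
    pvMod_toNat_lt _ hn _
  have hlenD : ((nl.map (fun row => row.getD j 0)).drop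
      (nl.length - (PySem.Int.mod (sh.getD j 0) (nl.length : Int)).toNat)).length =
      (PySem.Int.mod (sh.getD j 0) (nl.length : Int)).toNat := by
    simp only [List.length_drop, List.length_map]; omega
  have hlenA : ((nl.map (fun row => row.getD j 0)).drop
      (nl.length - (PySem.Int.mod (sh.getD j 0) (nl.length : Int)).toNat) ++
      (nl.map (fun row => row.getD j 0)).take
      (nl.length - (PySem.Int.mod (sh.getD j 0) (nl.length : Int)).toNat)).length = nl.length := by
    simp only [List.length_append, List.length_drop, List.length_take, List.length_map]; omega
  rw [List.getD_eq_getElem _ _ (by simpa using hj), List.getElem_map, List.getElem_map,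
      List.getElem_range]
  rw [pvRi_eq nl.length hn (sh.getD j 0) i hi]
  by_cases his : i < (PySem.Int.mod (sh.getD j 0) (nl.length : Int)).toNat
  · rw [if_pos his,
        List.getD_eq_getElem _ _ (by rw [hlenA]; exact hi),
        List.getElem_append_left (by rw [hlenD]; exact his),
        List.getElem_drop, List.getElem_map]
    unfold pvGet2
    rw [List.getD_eq_getElem nl [] (by omega)]
  · rw [if_neg his,
        List.getD_eq_getElem _ _ (by rw [hlenA]; exact hi),
        List.getElem_append_right (by rw [hlenD]; omega),
        List.getElem_take, List.getElem_map]
    unfold pvGet2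
    rw [List.getD_eq_getElem nl [] (by omega)]
    congr 2
    simp only [List.length_drop, List.length_map]
    omega

theorem shift_columns_spec : Claim_equal_shift_columns := by
  intro nl sh _ hpre
  unfold Spec_shift_columns
  by_cases h0 : nl = [] ∨ sh = []
  · unfold shift_columns shift_columns_alt
    rw [if_pos h0, if_pos h0]
  · rcases hpre with h | h | ⟨hrows, hlen⟩
    · exact absurd (Or.inl h) h0
    · exact absurd (Or.inr h) h0
    have hn : 0 < nl.length := List.length_pos_iff.mpr (fun h => h0 (Or.inl h))
    have hall : nl.all (fun sublist => sublist.length == (nl.headD []).length) = true := by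
      rw [List.all_eq_true]; intro x hx; exact beq_iff_eq.mpr (hrows x hx)
    have hA : shift_columns nl sh = (List.range (nl.headD []).length).foldl
        (fun shifted col => (List.range nl.length).foldl (fun shifted (row : Nat) =>
          pvSetCell shifted (PySem.Int.mod ((row : Int) + sh.getD col 0) (nl.length : Int)).toNat col
            ((nl.getD row []).getD col 0)) shifted)
        ((List.range nl.length).map (fun _ => List.replicate (nl.headD []).length (0 : Int))) := by
      unfold shift_columns
      rw [if_neg h0]
      simp only [hall, hlen, if_false, ne_eq, not_true_eq_false]
    have hB : shift_columns_alt nl sh = (List.range nl.length).map (fun i =>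
        ((List.range (nl.headD []).length).map (fun col =>
          (nl.map (fun row => row.getD col 0)).drop
              (nl.length - (PySem.Int.mod (sh.getD col 0) (nl.length : Int)).toNat) ++
            (nl.map (fun row => row.getD col 0)).take
              (nl.length - (PySem.Int.mod (sh.getD col 0) (nl.length : Int)).toNat))).map
          (fun c => c.getD i 0)) := by
      unfold shift_columns_alt
      rw [if_neg h0]
      simp only [hall, hlen, if_false, ne_eq, not_true_eq_false]
    rw [hA, hB]
    have hshape := pvFold_shape
      (fun shifted col => (List.range nl.length).foldl (fun shifted (row : Nat) =>
        pvSetCell shifted (PySem.Int.mod ((row : Int) + sh.getD col 0) (nl.length : Int)).toNat col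
          ((nl.getD row []).getD col 0)) shifted)
      (fun a x => (pvFold_shape _ (fun a x => pvSetCell_length ..)
        (fun a x k => pvSetCell_rowlen ..) _ a).1)
      (fun a x k => (pvFold_shape _ (fun a x => pvSetCell_length ..)
        (fun a x k => pvSetCell_rowlen ..) _ a).2 k)
      (List.range (nl.headD []).length)
      ((List.range nl.length).map (fun _ => List.replicate (nl.headD []).length (0 : Int)))
    have hinit_row : ∀ k, k < nl.length →
        ((((List.range nl.length).map (fun _ => List.replicate (nl.headD []).length (0 : Int))).getD k []).length)
          = (nl.headD []).length := by
      intro k hk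
      rw [List.getD_eq_getElem _ _ (by simpa using hk), List.getElem_map]
      simp
    apply pvExt2
    · rw [hshape.1]; simp
    · intro i hi'
      have hi : i < nl.length := by rw [hshape.1] at hi'; simpa using hi'
      rw [hshape.2 i, hinit_row i hi,
          List.getD_eq_getElem _ _ (by simpa using hi), List.getElem_map, List.getElem_range]
      simp
    · intro i j hi' hj'
      have hi : i < nl.length := by rw [hshape.1] at hi'; simpa using hi'
      have hj : j < (nl.headD []).length := by
        rw [hshape.2 i, hinit_row i hi] at hj'; exact hj'
      have hL : pvGet2 ((List.range (nl.headD []).length).foldl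
          (fun shifted col => (List.range nl.length).foldl (fun shifted (row : Nat) =>
            pvSetCell shifted (PySem.Int.mod ((row : Int) + sh.getD col 0) (nl.length : Int)).toNat col
              ((nl.getD row []).getD col 0)) shifted)
          ((List.range nl.length).map (fun _ => List.replicate (nl.headD []).length (0 : Int)))) i j =
          pvGet2 nl (PySem.Int.mod ((i : Int) - sh.getD j 0) (nl.length : Int)).toNat j := by
        rw [pvOuter_get nl sh hn (List.range (nl.headD []).length) _
            (by simp) hinit_row (List.nodup_range) (fun c hc => List.mem_range.mp hc) i j hi,
          if_pos (List.mem_range.mpr hj)]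
      have hR : ((((List.range nl.length).map (fun i =>
          ((List.range (nl.headD []).length).map (fun col =>
            (nl.map (fun row => row.getD col 0)).drop
                (nl.length - (PySem.Int.mod (sh.getD col 0) (nl.length : Int)).toNat) ++
              (nl.map (fun row => row.getD col 0)).take
                (nl.length - (PySem.Int.mod (sh.getD col 0) (nl.length : Int)).toNat))).map
            (fun c => c.getD i 0))).getD i []).getD j 0) =
          pvGet2 nl (PySem.Int.mod ((i : Int) - sh.getD j 0) (nl.length : Int)).toNat j := by
        have hrow_i : (((List.range nl.length).map (fun i =>
            ((List.range (nl.headD []).length).map (fun col =>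
              (nl.map (fun row => row.getD col 0)).drop
                  (nl.length - (PySem.Int.mod (sh.getD col 0) (nl.length : Int)).toNat) ++
                (nl.map (fun row => row.getD col 0)).take
                  (nl.length - (PySem.Int.mod (sh.getD col 0) (nl.length : Int)).toNat))).map
              (fun c => c.getD i 0))).getD i []) =
            ((List.range (nl.headD []).length).map (fun col =>
              (nl.map (fun row => row.getD col 0)).drop
                  (nl.length - (PySem.Int.mod (sh.getD col 0) (nl.length : Int)).toNat) ++
                (nl.map (fun row => row.getD col 0)).take
                  (nl.length - (PySem.Int.mod (sh.getD col 0) (nl.length : Int)).toNat))).map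
              (fun c => c.getD i 0) := by
          rw [List.getD_eq_getElem _ _ (by simpa using hi), List.getElem_map, List.getElem_range]
        rw [hrow_i]
        exact pvB_cell nl sh hn i j hi hj
      exact hL.trans hR.symm
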